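-- pv_equiv track=rewrite | github.com/anonymousRANLP/NERAncientGreek | code_greek_ner/classification/Classifier.py | get_valid_subwords
-- ===== SOURCE A (Python) =====
-- def get_valid_subwords(subword_ids, last_subword=True):
--     # subword_ids is a list with None for the special tokens ([CLS], [SEP] etc.) and ids for each part of the respective word
--     # E.g.:
--     #[CLS] None
--     #ὁ 0
--     #γάρ 1
--     #κόσμο 2
--     #ς 2
--     #προϋ 3
--     #φέστηκε 3
--     #πάντων 4
--     #τελειότατο 5
--     #ς 5
--     #ὤν 6
--     #· 7
--     #[SEP] None
--     valid_subwords = []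
--     for i, current_subword_id in enumerate(subword_ids):
--         if current_subword_id is None:
--             # Any special token is not a valid subword
--             valid_subwords.append(False)
--         elif last_subword:
--             # If we want to label the last subword, we have the following cases
--             # If the token is at the end of the list, and has a number, it is automatically a valid subword
--             # Note, this would not happen unless we don't have a [SEP] token, but added just in case
--             if i == len(subword_ids) - 1:
--                 valid_subwords.append(True)
--             # If the next token has the same id as the current token, it is not the last subtoken and not a valid subword
--             elif subword_ids[i+1] == current_subword_id:
--                 valid_subwords.append(False)
--             # Otherwise, it is the last subtoken of the word
--             else:
--                 valid_subwords.append(True)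
--         else:
--             # If we want to label the first subword, we have the following cases
--             # If the token is at the start of the list, and has a number, it is automatically a valid subword
--             # Note, this would not happen unless we don't have a [CLS] token, but added just in case
--             if i==0:
--                 valid_subwords.append(True)
--             # If the previous token has the same id as the current token, it is not the first subtoken and not a valid subword
--             elif subword_ids[i-1] == current_subword_id:
--                 valid_subwords.append(False)
--             # Otherwise, it is the first subtoken of the word
--             else:
--                 valid_subwords.append(True)
--     return valid_subwords
-- ===== SOURCE B (Python) =====
-- def get_valid_subwords(subword_ids, last_subword=True):
--     # Run-length segmentation: walk over maximal runs of equal ids and emit a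
--     # whole boolean block per run, instead of testing each element against a neighbour.
--     valid_subwords = []
--     i, n = 0, len(subword_ids)
--     while i < n:
--         j = i + 1
--         while j < n and subword_ids[j] == subword_ids[i]:
--             j += 1
--         run = j - i
--         if subword_ids[i] is None:
--             valid_subwords.extend([False] * run)
--         elif last_subword:
--             valid_subwords.extend([False] * (run - 1) + [True])
--         else:
--             valid_subwords.extend([True] + [False] * (run - 1))
--         i = j
--     return valid_subwords
-- ===== Notes on version B (the rewrite author's own statement) =====
-- stated objective: alternative
-- what changed: B replaces A's per-element neighbour-comparison branches by run-length segmentation: it walks over maximal runs of equal ids and emits one boolean block per run (all-False for None runs, False*(L-1)+[True] or [True]+False*(L-1) otherwise).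
import Mathlib
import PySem

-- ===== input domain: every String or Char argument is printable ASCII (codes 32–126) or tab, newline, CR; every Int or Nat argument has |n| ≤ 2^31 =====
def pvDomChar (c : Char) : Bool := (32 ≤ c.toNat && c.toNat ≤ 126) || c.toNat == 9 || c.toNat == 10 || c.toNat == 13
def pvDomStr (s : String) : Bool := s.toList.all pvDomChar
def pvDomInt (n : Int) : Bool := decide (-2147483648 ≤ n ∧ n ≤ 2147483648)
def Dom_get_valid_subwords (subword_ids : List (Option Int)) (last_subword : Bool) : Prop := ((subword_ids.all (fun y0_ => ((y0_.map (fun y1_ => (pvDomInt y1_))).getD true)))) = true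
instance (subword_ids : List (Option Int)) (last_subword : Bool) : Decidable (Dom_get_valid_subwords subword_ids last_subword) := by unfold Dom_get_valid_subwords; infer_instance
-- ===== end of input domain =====

-- B replaces A's per-element neighbour comparisons by run-length segmentation,
-- emitting one boolean block per maximal run of equal ids: an alternative decomposition, same cost.

-- ===== PORT A =====
-- literal transliteration of A's enumerate loop with its branch order
def get_valid_subwords (subword_ids : List (Option Int)) (last_subword : Bool) : List Bool :=
  (PySem.List.enumerate subword_ids).foldl
    (fun valid_subwords ic =>
      match ic.2 with
      | none => valid_subwords ++ [false]
      | some c =>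
        if last_subword then
          if ic.1 = (subword_ids.length : Int) - 1 then valid_subwords ++ [true]
          -- subword_ids[i+1]: here i ≠ len-1, so the index is in range and pyGetD is exact
          else if PySem.List.pyGetD subword_ids (ic.1 + 1) none = some c then valid_subwords ++ [false]
          else valid_subwords ++ [true]
        else
          if ic.1 = 0 then valid_subwords ++ [true]
          -- subword_ids[i-1]: here i ≠ 0, so the index is in range and pyGetD is exact
          else if PySem.List.pyGetD subword_ids (ic.1 - 1) none = some c then valid_subwords ++ [false]
          else valid_subwords ++ [true])
    []

-- ===== PORT B =====
-- inner 'while j < n and subword_ids[j] == subword_ids[i]' loop of Source B: length of the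
-- run of elements equal to x, and the remainder of the list after the run
def pvTakeRun (x : Option Int) : List (Option Int) → Nat × List (Option Int)
  | [] => (0, [])
  | y :: t => if y = x then ((pvTakeRun x t).1 + 1, (pvTakeRun x t).2) else (0, y :: t)

-- needed by the port's termination argument
lemma pvTakeRun_snd_length_le (x : Option Int) (t : List (Option Int)) :
    (pvTakeRun x t).2.length ≤ t.length := by
  induction t with
  | nil => simp [pvTakeRun]
  | cons y t ih =>
    simp only [pvTakeRun]
    split_ifs
    · exact Nat.le_succ_of_le ih
    · exact Nat.le_refl _

-- outer while loop of Source B: peel one run, emit its block, continue on the remainder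
def get_valid_subwords_alt (subword_ids : List (Option Int)) (last_subword : Bool) : List Bool :=
  match subword_ids with
  | [] => []
  | x :: t =>
    let p := pvTakeRun x t
    let run := p.1 + 1
    let block :=
      if x = none then List.replicate run false
      else if last_subword then List.replicate (run - 1) false ++ [true]
      else true :: List.replicate (run - 1) false
    block ++ get_valid_subwords_alt p.2 last_subword
termination_by subword_ids.length
decreasing_by
  simpa using Nat.lt_succ_of_le (pvTakeRun_snd_length_le x t)

-- ===== PRECONDITION & SPEC =====
def Spec_get_valid_subwords (subword_ids : List (Option Int)) (last_subword : Bool) (out : List Bool) : Prop := out = get_valid_subwords_alt subword_ids last_subword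
instance (subword_ids : List (Option Int)) (last_subword : Bool) (out : List Bool) : Decidable (Spec_get_valid_subwords subword_ids last_subword out) := by unfold Spec_get_valid_subwords; infer_instance

-- ===== CLAIM (what is proved, stated in full; the proofs are below) =====
def Claim_equal_get_valid_subwords : Prop := ∀ (subword_ids : List (Option Int)) (last_subword : Bool), Dom_get_valid_subwords subword_ids last_subword → Spec_get_valid_subwords subword_ids last_subword (get_valid_subwords subword_ids last_subword)

-- ===== LEMMAS AND PROOFS =====

-- reference head-recursion for the last-subword rule
def refLast : List (Option Int) → List Bool
  | [] => []
  | [x] => [x.isSome]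
  | x :: y :: t => (x.isSome && decide (y ≠ x)) :: refLast (y :: t)

-- reference head-recursion for the first-subword rule, carrying the previous element
def refFirstA (p : Option (Option Int)) : List (Option Int) → List Bool
  | [] => []
  | x :: t => (x.isSome && decide (some x ≠ p)) :: refFirstA (some x) t

-- spec of pvTakeRun: the input splits as run ++ remainder, and the remainder starts differently
lemma pvTakeRun_spec (x : Option Int) (t : List (Option Int)) :
    t = List.replicate (pvTakeRun x t).1 x ++ (pvTakeRun x t).2 ∧
      (pvTakeRun x t).2.head? ≠ some x := by
  induction t with
  | nil => simp [pvTakeRun]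
  | cons y t ih =>
    simp only [pvTakeRun]
    split_ifs with h
    · subst h
      exact ⟨by rw [List.replicate_succ]; exact congrArg _ ih.1, ih.2⟩
    · exact ⟨by simp, by simp [h]⟩

lemma refLast_run (x : Option Int) (k : Nat) (r : List (Option Int)) :
    refLast (x :: (List.replicate k x ++ r)) =
      List.replicate k false ++ (x.isSome && decide (r.head? ≠ some x)) :: refLast r := by
  induction k with
  | zero =>
    cases r with
    | nil => simp [refLast]
    | cons y r' => simp [refLast]
  | succ k ih =>
    rw [List.replicate_succ]
    show refLast (x :: x :: (List.replicate k x ++ r)) = _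
    rw [refLast, ih, List.replicate_succ]
    simp

lemma refFirstA_replicate (x : Option Int) (k : Nat) (r : List (Option Int)) :
    refFirstA (some x) (List.replicate k x ++ r) =
      List.replicate k false ++ refFirstA (some x) r := by
  induction k with
  | zero => simp
  | succ k ih =>
    rw [List.replicate_succ, List.cons_append, refFirstA, ih, List.replicate_succ]
    simp

lemma refFirstA_head_ne (x : Option Int) (r : List (Option Int))
    (h : r.head? ≠ some x) :
    refFirstA (some x) r = refFirstA none r := by
  cases r with
  | nil => rfl
  | cons y r' =>
    simp only [List.head?_cons, ne_eq, Option.some.injEq] at h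
    simp [refFirstA, h]

-- B computes refLast for last_subword = true
lemma B_true (n : Nat) : ∀ ids : List (Option Int), ids.length ≤ n →
    get_valid_subwords_alt ids true = refLast ids := by
  induction n with
  | zero =>
    intro ids h
    have : ids = [] := List.eq_nil_of_length_eq_zero (Nat.le_zero.mp h)
    subst this
    simp [get_valid_subwords_alt, refLast]
  | succ n ih =>
    intro ids h
    cases ids with
    | nil => simp [get_valid_subwords_alt, refLast]
    | cons x t =>
      obtain ⟨hsplit, hhead⟩ := pvTakeRun_spec x t
      rw [get_valid_subwords_alt]
      have hr : get_valid_subwords_alt (pvTakeRun x t).2 true = refLast (pvTakeRun x t).2 :=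
        ih _ (le_trans (pvTakeRun_snd_length_le x t) (Nat.le_of_succ_le_succ (by simpa using h)))
      conv_rhs => rw [hsplit]
      rw [refLast_run, ← hr]
      cases x with
      | none =>
        simp [List.replicate_succ', List.append_assoc]
      | some c =>
        simp [hhead, List.append_assoc]

-- B computes refFirstA none for last_subword = false
lemma B_false (n : Nat) : ∀ ids : List (Option Int), ids.length ≤ n →
    get_valid_subwords_alt ids false = refFirstA none ids := by
  induction n with
  | zero =>
    intro ids h
    have : ids = [] := List.eq_nil_of_length_eq_zero (Nat.le_zero.mp h)
    subst this
    simp [get_valid_subwords_alt, refFirstA]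
  | succ n ih =>
    intro ids h
    cases ids with
    | nil => simp [get_valid_subwords_alt, refFirstA]
    | cons x t =>
      obtain ⟨hsplit, hhead⟩ := pvTakeRun_spec x t
      rw [get_valid_subwords_alt]
      have hr : get_valid_subwords_alt (pvTakeRun x t).2 false = refFirstA none (pvTakeRun x t).2 :=
        ih _ (le_trans (pvTakeRun_snd_length_le x t) (Nat.le_of_succ_le_succ (by simpa using h)))
      conv_rhs => rw [hsplit]
      rw [refFirstA, refFirstA_replicate,
          refFirstA_head_ne x _ hhead, ← hr]
      cases x with
      | none => simp [List.replicate_succ]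
      | some c => simp

-- the per-element value of A's loop body
def pvGA (ids : List (Option Int)) (last : Bool) (ic : Int × Option Int) : Bool :=
  match ic.2 with
  | none => false
  | some c =>
    if last then
      if ic.1 = (ids.length : Int) - 1 then true
      else if PySem.List.pyGetD ids (ic.1 + 1) none = some c then false
      else true
    else
      if ic.1 = 0 then true
      else if PySem.List.pyGetD ids (ic.1 - 1) none = some c then false
      else true

lemma A_eq_map (ids : List (Option Int)) (last : Bool) :
    get_valid_subwords ids last = (PySem.List.enumerate ids).map (pvGA ids last) := by
  unfold get_valid_subwords
  have h : (fun (valid_subwords : List Bool) (ic : Int × Option Int) =>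
      match ic.2 with
      | none => valid_subwords ++ [false]
      | some c =>
        if last then
          if ic.1 = (ids.length : Int) - 1 then valid_subwords ++ [true]
          else if PySem.List.pyGetD ids (ic.1 + 1) none = some c then valid_subwords ++ [false]
          else valid_subwords ++ [true]
        else
          if ic.1 = 0 then valid_subwords ++ [true]
          else if PySem.List.pyGetD ids (ic.1 - 1) none = some c then valid_subwords ++ [false]
          else valid_subwords ++ [true]) =
      (fun acc ic => acc ++ [pvGA ids last ic]) := by
    funext acc ic
    rcases ic with ⟨i, c⟩
    cases c
    · rfl
    · simp only [pvGA]; split_ifs <;> rfl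
  rw [h, PySem.List.foldl_append_singleton_eq_map]
  simp

lemma enum_getElem? {α : Type} (xs : List α) (s : Int) (k : Nat) :
    (PySem.List.enumerate xs s)[k]? = (xs[k]?).map (fun x => (s + (k : Int), x)) := by
  induction xs generalizing s k with
  | nil => simp [PySem.List.enumerate]
  | cons a t ih =>
    rw [PySem.List.enumerate_cons]
    cases k with
    | zero => simp
    | succ k =>
      simp only [List.getElem?_cons_succ, ih]
      cases t[k]? with
      | none => simp
      | some v => simp; ring

lemma pyGetD_nat (ids : List (Option Int)) (k : Nat) (hk : k < ids.length) :
    PySem.List.pyGetD ids (k : Int) none = ids[k] := by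
  rw [PySem.List.pyGetD_eq_getElem ids none (by positivity) (by exact_mod_cast hk)]
  simp

lemma refLast_get? (ids : List (Option Int)) (k : Nat) :
    (refLast ids)[k]? =
      ids[k]?.map (fun v => v.isSome && decide (ids[k+1]? ≠ some v)) := by
  induction ids generalizing k with
  | nil => simp [refLast]
  | cons x t ih =>
    cases t with
    | nil =>
      cases k with
      | zero => simp [refLast]
      | succ k => simp [refLast]
    | cons y t' =>
      cases k with
      | zero => simp [refLast]
      | succ k =>
        show (refLast (y :: t'))[k]? = _
        rw [ih k]
        simp

lemma refFirstA_get? (p : Option (Option Int)) (ids : List (Option Int)) (k : Nat) :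
    (refFirstA p ids)[k]? =
      ids[k]?.map (fun v => v.isSome && decide (some v ≠ (if k = 0 then p else ids[k-1]?))) := by
  induction ids generalizing p k with
  | nil => simp [refFirstA]
  | cons x t ih =>
    cases k with
    | zero => simp [refFirstA]
    | succ k =>
      show (refFirstA (some x) t)[k]? = _
      rw [ih (some x) k]
      cases k with
      | zero => simp
      | succ k => simp

-- ===== VERDICT (by name: the statement is the Claim_ definition above) =====
theorem get_valid_subwords_spec : Claim_equal_get_valid_subwords := by
  intro ids last _
  unfold Spec_get_valid_subwords
  rw [A_eq_map]
  cases last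
  · -- first-subword case
    rw [B_false ids.length ids (le_refl _)]
    apply List.ext_getElem?
    intro k
    rw [List.getElem?_map, enum_getElem?, refFirstA_get?, Option.map_map]
    cases h : ids[k]? with
    | none => simp
    | some v =>
      obtain ⟨hk, hv⟩ := List.getElem?_eq_some_iff.mp h
      simp only [Option.map_some, Option.some.injEq, Function.comp]
      cases v with
      | none => simp [pvGA]
      | some c =>
        by_cases hk0 : k = 0
        · subst hk0
          simp [pvGA]
        · have hidx : ids[k-1]? = some (ids[k-1]'(by omega)) :=
            List.getElem?_eq_getElem (by omega)
          have hprev : PySem.List.pyGetD ids ((0 : Int) + (k : Int) - 1) none = ids[k-1]'(by omega) := by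
            have h9 : (0 : Int) + (k : Int) - 1 = ((k - 1 : Nat) : Int) := by omega
            rw [h9, pyGetD_nat ids (k-1) (by omega)]
          have hk0' : ¬((0 : Int) + (k : Int) = 0) := by omega
          simp only [pvGA, hk0', if_neg hk0, hidx, hprev, if_false]
          by_cases he : ids[k-1]'(by omega) = some c
          · simp [he]
          · simp [he, Ne.symm he]
  · -- last-subword case
    rw [B_true ids.length ids (le_refl _)]
    apply List.ext_getElem?
    intro k
    rw [List.getElem?_map, enum_getElem?, refLast_get?, Option.map_map]
    cases h : ids[k]? with
    | none => simp
    | some v =>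
      obtain ⟨hk, hv⟩ := List.getElem?_eq_some_iff.mp h
      simp only [Option.map_some, Option.some.injEq, Function.comp]
      cases v with
      | none => simp [pvGA]
      | some c =>
        by_cases hlast : k = ids.length - 1
        · have hnone : ids[k+1]? = none := by apply List.getElem?_eq_none; omega
          have hl : (0 : Int) + (k : Int) = (ids.length : Int) - 1 := by omega
          simp [pvGA, hl, hnone]
        · have hidx : ids[k+1]? = some (ids[k+1]'(by omega)) :=
            List.getElem?_eq_getElem (by omega)
          have hnext : PySem.List.pyGetD ids ((0 : Int) + (k : Int) + 1) none = ids[k+1]'(by omega) := by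
            have h9 : (0 : Int) + (k : Int) + 1 = ((k + 1 : Nat) : Int) := by push_cast; ring
            rw [h9, pyGetD_nat ids (k+1) (by omega)]
          have hne2 : ¬((0 : Int) + (k : Int) = (ids.length : Int) - 1) := by
            intro hq; apply hlast; omega
          simp only [pvGA, if_neg hne2, hnext]
          by_cases he : ids[k+1]'(by omega) = some c
          · simp [hidx, he]
          · simp [hidx, he]
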